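-- pv_equiv track=rewrite | github.com/1-Vast/RNA-OmniDistill | utils/structure.py | pairs_to_dot_bracket
-- ===== SOURCE A (Python) =====
-- from typing import Dict, Iterable, List, Sequence, Tuple
--
-- Pair = Tuple[int, int]
--
-- def pairs_to_dot_bracket(pairs: Iterable[Sequence[int]], length: int) -> str:
--     """Convert non-pseudoknotted 0-based pairs to dot-bracket structure."""
--     chars = ["."] * length
--     used = set()
--     normalized: List[Pair] = []
--
--     for raw_i, raw_j in pairs:
--         i, j = int(raw_i), int(raw_j)
--         if i == j:
--             raise ValueError(f"Self-pair at position {i} is invalid.")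
--         if i > j:
--             i, j = j, i
--         if i < 0 or j >= length:
--             raise ValueError(f"Pair {(i, j)} is outside structure length {length}.")
--         if i in used or j in used:
--             raise ValueError(f"Position reused by pair {(i, j)}.")
--         used.add(i)
--         used.add(j)
--         normalized.append((i, j))
--
--     for i, j in normalized:
--         chars[i] = "("
--         chars[j] = ")"
--     return "".join(chars)
-- ===== SOURCE B (Python) =====
-- def pairs_to_dot_bracket(pairs, length):
--     """Convert non-pseudoknotted 0-based pairs to dot-bracket structure."""
--     norm = [(min(int(a), int(b)), max(int(a), int(b))) for a, b in pairs]
--     for i, j in norm: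
--         if i == j:
--             raise ValueError(f"Self-pair at position {i} is invalid.")
--         if i < 0 or j >= length:
--             raise ValueError(f"Pair {(i, j)} is outside structure length {length}.")
--     ends = sorted(e for p in norm for e in p)
--     for a, b in zip(ends, ends[1:]):
--         if a == b:
--             raise ValueError(f"Position {a} reused.")
--     opens = {i for i, _ in norm}
--     closes = {j for _, j in norm}
--     return "".join("(" if k in opens else ")" if k in closes else "." for k in range(length))
-- ===== Notes on version B (the rewrite author's own statement) =====
-- stated objective: alternative
-- what changed: Staged pipeline instead of A's single validating loop with a used-set: normalize all pairs by a comprehension, validate self/bounds in one scan, detect reuse by sorting all endpoints and scanning adjacent duplicates (sort-then-scan instead of a hash set), then generate the output string per index from two endpoint sets instead of mutating a character array.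
import Mathlib
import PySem

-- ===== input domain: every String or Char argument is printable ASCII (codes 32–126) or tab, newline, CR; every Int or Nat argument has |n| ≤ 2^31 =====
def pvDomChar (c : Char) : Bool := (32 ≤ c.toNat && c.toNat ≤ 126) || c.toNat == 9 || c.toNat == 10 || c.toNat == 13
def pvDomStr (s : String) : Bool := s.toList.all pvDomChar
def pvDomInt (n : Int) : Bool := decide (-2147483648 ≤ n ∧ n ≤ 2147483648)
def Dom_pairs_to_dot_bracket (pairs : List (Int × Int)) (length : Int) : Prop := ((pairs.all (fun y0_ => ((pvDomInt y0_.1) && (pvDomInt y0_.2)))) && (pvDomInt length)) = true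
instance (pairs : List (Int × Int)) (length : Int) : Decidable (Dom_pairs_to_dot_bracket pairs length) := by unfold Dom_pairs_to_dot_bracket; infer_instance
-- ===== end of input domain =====

-- B is a staged pipeline (normalize-all, validate, sort endpoints and scan for duplicates,
-- generate the string per index from two endpoint sets) instead of A's single validating loop
-- that mutates a character array (objective: alternative).
-- Where Python A raises ValueError the ports return ""; those inputs are excluded by Pre_.

-- ===== PORT A =====
-- first loop of A: validates pairs, returns the `normalized` list (none = ValueError)
def pairsAux (length : Int) : List (Int × Int) → PySem.Set Int → List (Int × Int) → Option (List (Int × Int))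
  | [], _used, normalized => some normalized
  | (raw_i, raw_j) :: rest, used, normalized =>
    let i := raw_i
    let j := raw_j
    if i == j then none                                  -- raise ValueError (self-pair)
    else
      let i' := if i > j then j else i
      let j' := if i > j then i else j
      if i' < 0 ∨ j' ≥ length then none                  -- raise ValueError (outside length)
      else if used.contains i' ∨ used.contains j' then none  -- raise ValueError (reused)
      else pairsAux length rest ((used.add i').add j') (normalized ++ [(i', j')])

-- second loop of A: chars[i] = "(" ; chars[j] = ")"
def writeLoop (normalized : List (Int × Int)) (chars : List Char) : List Char :=
  normalized.foldl (fun ch p => (ch.set p.1.toNat '(').set p.2.toNat ')') chars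

def pairs_to_dot_bracket (pairs : List (Int × Int)) (length : Int) : String :=
  match pairsAux length pairs PySem.Set.empty [] with
  | some normalized => String.mk (writeLoop normalized (List.replicate length.toNat '.'))
  | none => ""      -- Python raises here; excluded by Pre_

-- ===== PORT B =====
-- B's validation scan over the normalized list (false = ValueError)
def checkNorm (length : Int) : List (Int × Int) → Bool
  | [] => true
  | (i, j) :: rest =>
    if i == j then false
    else if i < 0 ∨ j ≥ length then false
    else checkNorm length rest

-- B's duplicate scan over zip(ends, ends[1:])
def hasAdjDup : List Int → Bool
  | [] => false
  | [_] => false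
  | a :: b :: rest => a == b || hasAdjDup (b :: rest)

def pairs_to_dot_bracket_alt (pairs : List (Int × Int)) (length : Int) : String :=
  let norm := pairs.map (fun p => (min p.1 p.2, max p.1 p.2))
  if !checkNorm length norm then ""      -- Python raises here; excluded by Pre_
  else
    let ends := PySem.List.sorted (norm.flatMap (fun p => [p.1, p.2])) (fun x => x) false
    if hasAdjDup ends then ""            -- Python raises here; excluded by Pre_
    else
      let opens := PySem.Set.ofList (norm.map Prod.fst)
      let closes := PySem.Set.ofList (norm.map Prod.snd)
      String.mk ((PySem.List.pyRange 0 length 1).map (fun k =>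
        if opens.contains k then '(' else if closes.contains k then ')' else '.'))

-- ===== PRECONDITION & SPEC =====
-- Pre_ excludes exactly the inputs on which Python A (and Python B) raise ValueError:
-- a self-pair, an endpoint outside [0, length), or a position used by two pairs.
def Pre_pairs_to_dot_bracket (pairs : List (Int × Int)) (length : Int) : Prop :=
  (∀ p ∈ pairs, p.1 ≠ p.2 ∧ 0 ≤ min p.1 p.2 ∧ max p.1 p.2 < length) ∧
  (pairs.flatMap (fun p => [p.1, p.2])).Nodup
instance (pairs : List (Int × Int)) (length : Int) : Decidable (Pre_pairs_to_dot_bracket pairs length) := by unfold Pre_pairs_to_dot_bracket; infer_instance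

def pvWitness_pairs_to_dot_bracket : (List (Int × Int)) × Int := ([(0, 4), (3, 1)], 5)

def Spec_pairs_to_dot_bracket (pairs : List (Int × Int)) (length : Int) (out : String) : Prop := out = pairs_to_dot_bracket_alt pairs length
instance (pairs : List (Int × Int)) (length : Int) (out : String) : Decidable (Spec_pairs_to_dot_bracket pairs length out) := by unfold Spec_pairs_to_dot_bracket; infer_instance

-- ===== CLAIM (what is proved, stated in full; the proofs are below) =====
def Claim_equal_pairs_to_dot_bracket : Prop := ∀ (pairs : List (Int × Int)) (length : Int), Dom_pairs_to_dot_bracket pairs length → Pre_pairs_to_dot_bracket pairs length → Spec_pairs_to_dot_bracket pairs length (pairs_to_dot_bracket pairs length)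

-- ===== LEMMAS AND PROOFS =====

-- endpoints of a pair list
def eps (norm : List (Int × Int)) : List Int := norm.flatMap (fun p => [p.1, p.2])

-- the normalized list B builds
def normOf (pairs : List (Int × Int)) : List (Int × Int) :=
  pairs.map (fun p => (min p.1 p.2, max p.1 p.2))

theorem eps_normOf_perm (pairs : List (Int × Int)) :
    (eps (normOf pairs)).Perm (eps pairs) := by
  induction pairs with
  | nil => rfl
  | cons p rest ih =>
    simp only [eps, normOf, List.map_cons, List.flatMap_cons] at *
    refine List.Perm.append ?_ ih
    rcases le_total p.1 p.2 with h | h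
    · simp [min_eq_left h, max_eq_right h]
    · rw [min_eq_right h, max_eq_left h]
      exact List.Perm.swap _ _ _

theorem checkNorm_of_valid (length : Int) (norm : List (Int × Int))
    (h : ∀ p ∈ norm, p.1 ≠ p.2 ∧ 0 ≤ p.1 ∧ p.2 < length) :
    checkNorm length norm = true := by
  induction norm with
  | nil => rfl
  | cons p rest ih =>
    obtain ⟨h1, h2, h3⟩ := h p (by simp)
    obtain ⟨i, j⟩ := p
    simp only at h1 h2 h3
    rw [checkNorm]
    simp only [beq_iff_eq, h1, if_false]
    rw [if_neg (by omega)]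
    exact ih (fun q hq => h q (by simp [hq]))

theorem hasAdjDup_eq_false_of_nodup (l : List Int) (h : l.Nodup) :
    hasAdjDup l = false := by
  induction l with
  | nil => rfl
  | cons a rest ih =>
    cases rest with
    | nil => rfl
    | cons b rest' =>
      rw [hasAdjDup]
      have hab : a ≠ b := by
        intro hEq; exact (List.nodup_cons.mp h).1 (hEq ▸ List.mem_cons_self)
      rw [beq_eq_false_iff_ne.mpr hab, Bool.false_or]
      exact ih (List.nodup_cons.mp h).2

theorem length_writeLoop (norm : List (Int × Int)) (ch : List Char) :
    (writeLoop norm ch).length = ch.length := by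
  induction norm generalizing ch with
  | nil => rfl
  | cons p rest ih => simp [writeLoop, List.foldl_cons] at *; simp [ih]

-- per-index characterization of A's write loop
theorem writeLoop_get (norm : List (Int × Int)) (ch : List Char) (q : Int)
    (hq : 0 ≤ q)
    (hnd : (eps norm).Nodup)
    (hb : ∀ e ∈ eps norm, 0 ≤ e ∧ e.toNat < ch.length) :
    (writeLoop norm ch)[q.toNat]? =
      if q ∈ norm.map Prod.fst then some '('
      else if q ∈ norm.map Prod.snd then some ')'
      else ch[q.toNat]? := by
  induction norm generalizing ch with
  | nil => simp [writeLoop]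
  | cons p rest ih =>
    simp only [eps, List.flatMap_cons, List.nodup_append] at hnd
    obtain ⟨hnd2, hndr, hdisj⟩ := hnd
    have hp12 : p.1 ≠ p.2 := by simpa using hnd2
    have hb1 := hb p.1 (by simp [eps])
    have hb2 := hb p.2 (by simp [eps])
    have hbr : ∀ e ∈ eps rest, 0 ≤ e ∧ e.toNat <
        (((ch.set p.1.toNat '(').set p.2.toNat ')')).length := by
      intro e he
      have he' : e ∈ eps (p :: rest) := by
        simp only [eps, List.flatMap_cons, List.mem_append]; right; exact he
      have := hb e he'
      simpa using this
    have hsubF : ∀ x, x ∈ rest.map Prod.fst → x ∈ eps rest := by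
      intro x hx
      obtain ⟨r, hr, rfl⟩ := List.mem_map.mp hx
      simp only [eps, List.mem_flatMap]; exact ⟨r, hr, by simp⟩
    have hsubS : ∀ x, x ∈ rest.map Prod.snd → x ∈ eps rest := by
      intro x hx
      obtain ⟨r, hr, rfl⟩ := List.mem_map.mp hx
      simp only [eps, List.mem_flatMap]; exact ⟨r, hr, by simp⟩
    have hp1r : p.1 ∉ eps rest := fun h => hdisj p.1 (by simp) p.1 h rfl
    have hp2r : p.2 ∉ eps rest := fun h => hdisj p.2 (by simp) p.2 h rfl
    rw [writeLoop, List.foldl_cons, ← writeLoop]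
    rw [ih _ hndr hbr]
    by_cases hq1 : q = p.1
    · rw [hq1]
      have hf : p.1 ∉ rest.map Prod.fst := fun h => hp1r (hsubF _ h)
      have hs : p.1 ∉ rest.map Prod.snd := fun h => hp1r (hsubS _ h)
      rw [if_neg hf, if_neg hs]
      have e2 : p.2.toNat ≠ p.1.toNat := by omega
      rw [List.getElem?_set_ne e2, List.getElem?_set_self hb1.2]
      simp
    · by_cases hq2 : q = p.2
      · rw [hq2]
        have hf : p.2 ∉ rest.map Prod.fst := fun h => hp2r (hsubF _ h)
        have hs : p.2 ∉ rest.map Prod.snd := fun h => hp2r (hsubS _ h)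
        rw [if_neg hf, if_neg hs]
        rw [List.getElem?_set_self (by simp; exact hb2.2)]
        have hnf : p.2 ∉ (p :: rest).map Prod.fst := by
          simp only [List.map_cons, List.mem_cons]
          rintro (h | h)
          · exact hp12 h.symm
          · exact hf h
        rw [if_neg hnf]
        simp
      · have e1 : p.1.toNat ≠ q.toNat := by omega
        have e2 : p.2.toNat ≠ q.toNat := by omega
        simp only [List.map_cons, List.mem_cons]
        rw [List.getElem?_set_ne e2, List.getElem?_set_ne e1]
        by_cases hf : q ∈ rest.map Prod.fst
        · simp [hf]
        · by_cases hs : q ∈ rest.map Prod.snd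
          · simp [hf, hs, hq1]
          · simp [hf, hs, hq1, hq2]

-- under Pre_, A's first loop succeeds and produces exactly B's normalized list
theorem pairsAux_eq (length : Int) (rest : List (Int × Int))
    (used : PySem.Set Int) (acc : List (Int × Int))
    (hv : ∀ p ∈ rest, p.1 ≠ p.2 ∧ 0 ≤ min p.1 p.2 ∧ max p.1 p.2 < length)
    (hdisj : ∀ x, x ∈ used → x ∉ eps rest)
    (hnd : (eps rest).Nodup) :
    pairsAux length rest used acc = some (acc ++ normOf rest) := by
  induction rest generalizing used acc with
  | nil => simp [pairsAux, normOf]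
  | cons p rest ih =>
    obtain ⟨ri, rj⟩ := p
    obtain ⟨h1, h2, h3⟩ := hv (ri, rj) (by simp)
    simp only at h1 h2 h3
    rw [pairsAux]
    simp only [beq_iff_eq, h1, if_false]
    have hi : (if ri > rj then rj else ri) = min ri rj := by omega
    have hj : (if ri > rj then ri else rj) = max ri rj := by omega
    rw [hi, hj]
    rw [if_neg (by omega)]
    have hmin_eps : min ri rj ∈ eps ((ri, rj) :: rest) := by
      simp [eps]; omega
    have hmax_eps : max ri rj ∈ eps ((ri, rj) :: rest) := by
      simp [eps]; omega
    have hcont : ∀ x : Int, used.contains x = true ↔ x ∈ used := by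
      intro x; simp [PySem.Set.contains, List.contains_eq_mem]
    rw [if_neg (by
      rintro (h | h)
      · exact hdisj _ ((hcont _).mp h) hmin_eps
      · exact hdisj _ ((hcont _).mp h) hmax_eps)]
    have hnd' : (eps rest).Nodup := by
      simp only [eps, List.flatMap_cons, List.nodup_append] at hnd
      exact hnd.2.1
    have hsub : ∀ x, x ∈ eps rest → x ∈ eps ((ri, rj) :: rest) := by
      intro x hx; simp only [eps, List.flatMap_cons, List.mem_append]; right; exact hx
    have hnd12 : min ri rj ∉ eps rest ∧ max ri rj ∉ eps rest := by
      simp only [eps, List.flatMap_cons, List.nodup_append] at hnd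
      constructor
      · intro h
        rcases (by omega : min ri rj = ri ∨ min ri rj = rj) with hEq | hEq
        · exact hnd.2.2 ri (by simp) _ h hEq.symm
        · exact hnd.2.2 rj (by simp) _ h hEq.symm
      · intro h
        rcases (by omega : max ri rj = ri ∨ max ri rj = rj) with hEq | hEq
        · exact hnd.2.2 ri (by simp) _ h hEq.symm
        · exact hnd.2.2 rj (by simp) _ h hEq.symm
    rw [ih _ _ (fun q hq => hv q (by simp [hq]))
      (by
        intro x hx
        rw [PySem.Set.mem_add, PySem.Set.mem_add] at hx
        rcases hx with (hx | rfl) | rfl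
        · exact fun h => hdisj x hx (hsub x h)
        · exact hnd12.1
        · exact hnd12.2)
      hnd']
    simp [normOf]

-- ===== VERDICT (by name: the statement is the Claim_ definition above) =====
theorem pairs_to_dot_bracket_spec : Claim_equal_pairs_to_dot_bracket := by
  intro pairs length _hdom hpre
  obtain ⟨hv, hnd_raw⟩ := hpre
  unfold Spec_pairs_to_dot_bracket pairs_to_dot_bracket pairs_to_dot_bracket_alt
  -- facts about the normalized list
  have hnd_norm : (eps (normOf pairs)).Nodup :=
    (eps_normOf_perm pairs).nodup_iff.mpr hnd_raw
  have hv_norm : ∀ p ∈ normOf pairs, p.1 < p.2 ∧ 0 ≤ p.1 ∧ p.2 < length := by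
    intro p hp
    obtain ⟨q, hq, rfl⟩ := List.mem_map.mp hp
    obtain ⟨h1, h2, h3⟩ := hv q hq
    exact ⟨by omega, h2, h3⟩
  -- A's first loop = B's normalized list
  rw [pairsAux_eq length pairs PySem.Set.empty [] hv
    (by intro x hx; simp [PySem.Set.empty] at hx)
    ((eps_normOf_perm pairs).nodup_iff.mp hnd_norm)]
  -- B's checks pass
  have hc : checkNorm length (pairs.map (fun p => (min p.1 p.2, max p.1 p.2))) = true :=
    checkNorm_of_valid length (normOf pairs)
      (fun p hp => ⟨by have := hv_norm p hp; omega, (hv_norm p hp).2.1, (hv_norm p hp).2.2⟩)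
  have hperm := PySem.List.sorted_perm (eps (normOf pairs)) (fun x => x) false
  have hd : hasAdjDup (PySem.List.sorted
      ((pairs.map (fun p => (min p.1 p.2, max p.1 p.2))).flatMap (fun p => [p.1, p.2]))
      (fun x => x) false) = false :=
    hasAdjDup_eq_false_of_nodup _ (hperm.nodup_iff.mpr hnd_norm)
  simp only [hc, hd, Bool.not_true, Bool.false_eq_true, if_false, List.nil_append]
  rw [show List.map (fun p : Int × Int => (min p.1 p.2, max p.1 p.2)) pairs = normOf pairs from rfl]
  -- the two character lists agree index by index
  congr 1
  apply List.ext_getElem?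
  intro k
  by_cases hk : k < length.toNat
  · have hkr : (PySem.List.pyRange 0 length 1)[k]? = some ((k : Int)) := by
      rw [PySem.List.pyRange_one]
      simp only [Int.sub_zero, List.getElem?_map]
      rw [List.getElem?_range (by omega : k < length.toNat)]
      simp
    rw [List.getElem?_map, hkr, Option.map_some]
    have hq : ((k : Int)).toNat = k := by omega
    have hb : ∀ e ∈ eps (normOf pairs), 0 ≤ e ∧ e.toNat < (List.replicate length.toNat '.').length := by
      intro e he
      simp only [eps, List.mem_flatMap, List.mem_cons, List.not_mem_nil, or_false] at he
      obtain ⟨p, hp, he⟩ := he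
      obtain ⟨h1, h2, h3⟩ := hv_norm p hp
      simp only [List.length_replicate]
      rcases he with rfl | rfl
      · exact ⟨h2, by omega⟩
      · exact ⟨by omega, by omega⟩
    have := writeLoop_get (normOf pairs) (List.replicate length.toNat '.') (k : Int)
      (by omega) hnd_norm hb
    rw [hq] at this
    rw [this]
    have hrep : (List.replicate length.toNat '.')[k]? = some '.' := by
      rw [List.getElem?_replicate]; simp [hk]
    have hcF : (PySem.Set.ofList ((normOf pairs).map Prod.fst)).contains (k : Int) = true ↔
        (k : Int) ∈ (normOf pairs).map Prod.fst := by
      simp [PySem.Set.contains, List.contains_eq_mem, PySem.Set.mem_ofList]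
    have hcS : (PySem.Set.ofList ((normOf pairs).map Prod.snd)).contains (k : Int) = true ↔
        (k : Int) ∈ (normOf pairs).map Prod.snd := by
      simp [PySem.Set.contains, List.contains_eq_mem, PySem.Set.mem_ofList]
    by_cases hF : (k : Int) ∈ (normOf pairs).map Prod.fst
    · rw [if_pos hF, if_pos (hcF.mpr hF)]
    · rw [if_neg hF, if_neg (fun h => hF (hcF.mp h))]
      by_cases hS : (k : Int) ∈ (normOf pairs).map Prod.snd
      · rw [if_pos hS, if_pos (hcS.mpr hS)]
      · rw [if_neg hS, if_neg (fun h => hS (hcS.mp h)), hrep]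
  · have h1 : (writeLoop (normOf pairs) (List.replicate length.toNat '.')).length ≤ k := by
      rw [length_writeLoop]; simp; omega
    have h2 : (((PySem.List.pyRange 0 length 1).map (fun k =>
        if (PySem.Set.ofList ((normOf pairs).map Prod.fst)).contains k then '('
        else if (PySem.Set.ofList ((normOf pairs).map Prod.snd)).contains k then ')'
        else '.'))).length ≤ k := by
      rw [List.length_map, PySem.List.length_pyRange_one]; omega
    rw [List.getElem?_eq_none h1, List.getElem?_eq_none h2]
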